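-- pv_equiv track=rewrite | github.com/NickEvans/adventofcode2019 | day4b.py | noOddStreaks
-- ===== SOURCE A (Python) =====
-- def noOddStreaks(pw):
--     pw = str(pw)
--     pw = [digit for digit in str(pw)]
--     count = 0
--
--     for d in range(len(pw) - 1):
--         if pw[d] == pw[d+1]:
--             count += 1
--         else:
--             if count == 1:
--                 return True
--             count = 0
--     if count == 1:
--         return True
--     return False
-- ===== SOURCE B (Python) =====
-- def noOddStreaks(pw):
--     def runs(s):
--         if not s:
--             return []
--         gs = runs(s[1:])
--         if gs and gs[0][0] == s[0]:
--             return [[s[0]] + gs[0]] + gs[1:]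
--         return [[s[0]]] + gs
--     return any(len(g) == 2 for g in runs(str(pw)))
-- ===== Notes on version B (the rewrite author's own statement) =====
-- stated objective: alternative
-- what changed: B first run-length-groups the digit string into explicit runs (built by recursion) and then checks whether any run has length exactly two, instead of A's single pass with a running pair-counter, early return and a separate end-of-string counter check.
import Mathlib
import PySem

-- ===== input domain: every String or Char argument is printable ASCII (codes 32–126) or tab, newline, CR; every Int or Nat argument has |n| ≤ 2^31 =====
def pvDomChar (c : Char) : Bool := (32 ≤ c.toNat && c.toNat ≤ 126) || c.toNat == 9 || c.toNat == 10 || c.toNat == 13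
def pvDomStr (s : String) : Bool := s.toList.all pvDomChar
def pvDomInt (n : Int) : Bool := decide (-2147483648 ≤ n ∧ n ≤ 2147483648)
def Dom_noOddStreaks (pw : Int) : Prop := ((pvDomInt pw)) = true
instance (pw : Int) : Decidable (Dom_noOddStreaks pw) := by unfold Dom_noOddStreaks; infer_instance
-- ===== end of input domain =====

-- B groups the digit string into explicit runs and checks for a run of length exactly two;
-- same values as A on all ints, no speed claim (objective: alternative).

-- ===== PORT A =====
-- the index loop 'for d in range(len-1)' comparing pw[d] with pw[d+1], with early return,
-- transcribed as the structural recursion over consecutive pairs with the same counter state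
def pvALoop : List Char → Nat → Bool
  | a :: b :: rest, count =>
    if a == b then pvALoop (b :: rest) (count + 1)
    else if count == 1 then true else pvALoop (b :: rest) 0
  | _, count => count == 1

def noOddStreaks (pw : Int) : Bool :=
  pvALoop (PySem.Int.toStr pw).toList 0

-- ===== PORT B =====
-- Source B's recursive 'runs' helper, step for step
def pvRuns : List Char → List (List Char)
  | [] => []
  | x :: xs =>
    match pvRuns xs with
    | (y :: ys) :: gs => if x == y then (x :: y :: ys) :: gs else [x] :: (y :: ys) :: gs
    | gs => [x] :: gs

def noOddStreaks_alt (pw : Int) : Bool :=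
  (pvRuns (PySem.Int.toStr pw).toList).any (fun g => g.length == 2)

-- ===== PRECONDITION & SPEC =====
def Spec_noOddStreaks (pw : Int) (out : Bool) : Prop := out = noOddStreaks_alt pw
instance (pw : Int) (out : Bool) : Decidable (Spec_noOddStreaks pw out) := by unfold Spec_noOddStreaks; infer_instance

-- ===== CLAIM (what is proved, stated in full; the proofs are below) =====
def Claim_equal_noOddStreaks : Prop := ∀ (pw : Int), Dom_noOddStreaks pw → Spec_noOddStreaks pw (noOddStreaks pw)

-- ===== LEMMAS AND PROOFS =====

-- one unfolding step of pvRuns when the tail's runs are known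
theorem pvRuns_step (a b : Char) (l t : List Char) (gs : List (List Char))
    (h : pvRuns (b :: l) = (b :: t) :: gs) :
    pvRuns (a :: b :: l) =
      if a == b then (a :: b :: t) :: gs else [a] :: (b :: t) :: gs := by
  show (match pvRuns (b :: l) with
    | (y :: ys) :: gs => if a == y then (a :: y :: ys) :: gs else [a] :: (y :: ys) :: gs
    | gs => [a] :: gs) = _
  rw [h]

-- the first run of pvRuns (x :: xs) starts with x
theorem pvRuns_cons (x : Char) (xs : List Char) :
    ∃ t gs, pvRuns (x :: xs) = (x :: t) :: gs := by
  induction xs generalizing x with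
  | nil => exact ⟨[], [], rfl⟩
  | cons y ys ih =>
    obtain ⟨t, gs, h⟩ := ih y
    by_cases hxy : x == y
    · exact ⟨y :: t, gs, by rw [pvRuns_step x y ys t gs h, if_pos hxy]⟩
    · exact ⟨[], (y :: t) :: gs, by rw [pvRuns_step x y ys t gs h, if_neg hxy]⟩

-- invariant: with 'count' pairs already matched ending at x, A's loop answers
-- "the first run extended by count, or any later run, has length 2"
theorem pvALoop_eq (xs : List Char) (x : Char) (count : Nat) :
    pvALoop (x :: xs) count =
      match pvRuns (x :: xs) with
      | g :: gs => (decide (count + g.length = 2)) || gs.any (fun g => g.length == 2)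
      | [] => false := by
  induction xs generalizing x count with
  | nil =>
    simp only [pvALoop, pvRuns, List.length_cons, List.length_nil, List.any_nil,
      Bool.or_false]
    by_cases hc : count = 1
    · simp [hc]
    · simp [hc]
  | cons y ys ih =>
    obtain ⟨t, gs, h⟩ := pvRuns_cons y ys
    by_cases hxy : x == y
    · have : pvRuns (x :: y :: ys) = (x :: y :: t) :: gs := by
        rw [pvRuns_step x y ys t gs h, if_pos hxy]
      rw [this]
      simp only [pvALoop, hxy, if_true, ih y (count + 1), h]
      simp only [List.length_cons]
      congr 1
      simp only [decide_eq_decide]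
      omega
    · have : pvRuns (x :: y :: ys) = [x] :: (y :: t) :: gs := by
        rw [pvRuns_step x y ys t gs h, if_neg hxy]
      rw [this]
      simp only [pvALoop, hxy, ih y 0, h]
      by_cases hc : count = 1
      · simp [hc]
      · have h1 : (count == 1) = false := by simpa using hc
        have hd : (t.length == 1) = decide (t.length = 1) := by
          by_cases ht : t.length = 1 <;> simp [ht]
        simp [h1, hd, List.any_cons, hc]

theorem pvALoop_runs (l : List Char) :
    pvALoop l 0 = (pvRuns l).any (fun g => g.length == 2) := by
  cases l with
  | nil => simp [pvALoop, pvRuns]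
  | cons x xs =>
    rw [pvALoop_eq]
    obtain ⟨t, gs, h⟩ := pvRuns_cons x xs
    have hd : (t.length == 1) = decide (t.length = 1) := by
      by_cases ht : t.length = 1 <;> simp [ht]
    simp [h, hd, List.any_cons]

-- ===== VERDICT (by name: the statement is the Claim_ definition above) =====
theorem noOddStreaks_spec : Claim_equal_noOddStreaks := by
  intro pw _
  unfold Spec_noOddStreaks noOddStreaks noOddStreaks_alt
  exact pvALoop_runs _
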